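-- pv_equiv track=rewrite | github.com/mauboro/my_katas | string_transformer/main.py | string_transformer
-- ===== SOURCE A (Python) =====
-- def string_transformer(s):
--     res = []
--     temp = ""
--     s = s.swapcase()
--     for l in s:
--         if l != " ":
--             temp+=l
--         elif l == " ":
--             if temp:
--                 res.append(temp)
--                 temp = ""
--             res.append(" ")
--     res.append(temp)
--     return "".join(res[::-1])
-- ===== SOURCE B (Python) =====
-- def string_transformer(s):
--     return ' '.join(s.swapcase().split(' ')[::-1])
-- ===== Notes on version B (the rewrite author's own statement) =====
-- stated objective: simpler
-- what changed: replaces the character-by-character accumulator loop building a piece list with a one-liner: swapcase, split on the literal space, reverse the piece list, rejoin with spaces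
import Mathlib
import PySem

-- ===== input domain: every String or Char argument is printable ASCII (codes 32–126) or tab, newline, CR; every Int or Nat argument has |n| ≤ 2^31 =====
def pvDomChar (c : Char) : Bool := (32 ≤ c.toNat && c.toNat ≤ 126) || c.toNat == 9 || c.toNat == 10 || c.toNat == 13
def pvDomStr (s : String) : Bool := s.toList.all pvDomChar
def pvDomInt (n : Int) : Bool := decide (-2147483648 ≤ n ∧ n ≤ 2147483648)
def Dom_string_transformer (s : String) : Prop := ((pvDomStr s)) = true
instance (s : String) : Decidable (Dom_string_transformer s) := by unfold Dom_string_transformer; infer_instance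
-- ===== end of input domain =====

-- B is a simpler one-liner: swapcase, split on the literal space, reverse the piece list, rejoin.

-- str.swapcase, per character (exact on the ASCII domain; used by both ports, as both call .swapcase())
def swChar (c : Char) : Char :=
  if 'a' ≤ c ∧ c ≤ 'z' then Char.ofNat (c.toNat - 32)
  else if 'A' ≤ c ∧ c ≤ 'Z' then Char.ofNat (c.toNat + 32)
  else c

-- ===== PORT A =====
-- the for-loop over the chars of s.swapcase(), with state (res, temp); returns the final res (after res.append(temp))
def aLoop : List Char → List (List Char) → List Char → List (List Char)
  | [], res, temp => res ++ [temp]                          -- res.append(temp)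
  | l :: rest, res, temp =>
      if l ≠ ' ' then aLoop rest res (temp ++ [l])          -- temp += l
      else aLoop rest (res ++ (if temp ≠ [] then [temp, [' ']] else [[' ']])) []

def string_transformer (s : String) : String :=
  String.ofList (((aLoop ((s.toList).map swChar) [] []).reverse).flatten)   -- "".join(res[::-1])

-- ===== PORT B =====
def string_transformer_alt (s : String) : String :=
  String.ofList (PySem.Chars.join [' ']
    ((PySem.Chars.splitOn ((s.toList).map swChar) [' ']).reverse))          -- ' '.join(….split(' ')[::-1])

-- ===== PRECONDITION & SPEC =====
def Spec_string_transformer (s : String) (out : String) : Prop := out = string_transformer_alt s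
instance (s : String) (out : String) : Decidable (Spec_string_transformer s out) := by unfold Spec_string_transformer; infer_instance

-- ===== CLAIM (what is proved, stated in full; the proofs are below) =====
def Claim_equal_string_transformer : Prop := ∀ (s : String), Dom_string_transformer s → Spec_string_transformer s (string_transformer s)

-- ===== LEMMAS AND PROOFS =====

-- split of t on ' ' written as a plain structural recursion
def W : List Char → List (List Char)
  | [] => [[]]
  | c :: r => if c = ' ' then [] :: W r else
      match W r with
      | [] => [[c]]
      | w :: ws => (c :: w) :: ws

-- prepend h to the first piece
def consHead (h : List Char) : List (List Char) → List (List Char)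
  | [] => [h]
  | w :: ws => (h ++ w) :: ws

theorem W_ne_nil (t : List Char) : W t ≠ [] := by
  cases t with
  | nil => simp [W]
  | cons c r =>
    simp only [W]
    split
    · simp
    · split <;> simp

theorem consHead_nil (ws : List (List Char)) (h : ws ≠ []) : consHead [] ws = ws := by
  cases ws with
  | nil => exact absurd rfl h
  | cons w ws => simp [consHead]

theorem consHead_consHead (a : List Char) (c : Char) (ws : List (List Char)) :
    consHead a (consHead [c] ws) = consHead (a ++ [c]) ws := by
  cases ws <;> simp [consHead]

theorem go_eq (l : List Char) : ∀ (fuel : Nat) (cur : List Char) (acc : List (List Char)),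
    l.length ≤ fuel →
    PySem.Chars.splitOn.go [' '] fuel l cur acc = acc.reverse ++ consHead cur.reverse (W l) := by
  induction l with
  | nil =>
    intro fuel cur acc _
    cases fuel <;> simp [PySem.Chars.splitOn.go, W, consHead]
  | cons c rest ih =>
    intro fuel cur acc hf
    cases fuel with
    | zero => simp at hf
    | succ fuel =>
      by_cases hc : c = ' '
      · subst hc
        simp only [PySem.Chars.splitOn.go, List.isPrefixOf, beq_self_eq_true, Bool.true_and,
          if_true, List.length_cons, List.drop_succ_cons, List.drop_zero, List.length_nil]
        rw [ih fuel [] (cur.reverse :: acc) (by simpa using Nat.le_of_succ_le_succ hf)]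
        simp only [W, consHead, List.reverse_nil, List.nil_append]
        cases h : W rest with
        | nil => exact absurd h (W_ne_nil rest)
        | cons w ws => simp
      · simp only [PySem.Chars.splitOn.go]
        rw [if_neg (by simp [List.isPrefixOf]; exact fun h => hc h.symm)]
        rw [ih fuel (c :: cur) acc (Nat.le_of_succ_le_succ hf)]
        have : W (c :: rest) = consHead [c] (W rest) := by
          simp only [W, if_neg hc]
          cases h : W rest <;> simp [consHead]
        rw [this, consHead_consHead]
        simp

theorem splitOn_eq_W (t : List Char) : PySem.Chars.splitOn t [' '] = W t := by
  unfold PySem.Chars.splitOn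
  rw [go_eq t (t.length + 1) [] [] (Nat.le_succ _)]
  simp [consHead_nil _ (W_ne_nil t)]

theorem join_snoc (sep y : List Char) (xs : List (List Char)) (h : xs ≠ []) :
    PySem.Chars.join sep (xs ++ [y]) = PySem.Chars.join sep xs ++ sep ++ y := by
  induction xs with
  | nil => exact absurd rfl h
  | cons w ws ih =>
    cases ws with
    | nil => simp [PySem.Chars.join_cons_cons, PySem.Chars.join_singleton]
    | cons v vs =>
      rw [show ((w :: v :: vs) ++ [y]) = w :: v :: (vs ++ [y]) from rfl,
        PySem.Chars.join_cons_cons,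
        show (v :: (vs ++ [y])) = (v :: vs) ++ [y] from rfl,
        ih (by simp), PySem.Chars.join_cons_cons]
      simp

theorem aLoop_frame (t : List Char) : ∀ (res : List (List Char)) (temp : List Char),
    aLoop t res temp = res ++ aLoop t [] temp := by
  induction t with
  | nil => intro res temp; simp [aLoop]
  | cons l rest ih =>
    intro res temp
    by_cases hl : l = ' '
    · subst hl
      simp only [aLoop, ne_eq, not_true_eq_false, if_false]
      rw [ih (res ++ _), ih (([] : List (List Char)) ++ _)]
      simp
    · simp only [aLoop, if_pos (by simpa using hl : l ≠ ' ')]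
      exact ih res (temp ++ [l])

theorem main_lemma (t : List Char) : ∀ (temp : List Char),
    ((aLoop t [] temp).reverse).flatten
      = PySem.Chars.join [' '] ((consHead temp (W t)).reverse) := by
  induction t with
  | nil =>
    intro temp
    simp [aLoop, W, consHead, PySem.Chars.join_singleton]
  | cons l rest ih =>
    intro temp
    by_cases hl : l = ' '
    · subst hl
      simp only [aLoop, ne_eq, not_true_eq_false, if_false]
      rw [aLoop_frame]
      have hW : W (' ' :: rest) = [] :: W rest := by simp [W]
      have hcons : consHead temp ([] :: W rest) = temp :: W rest := by simp [consHead]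
      rw [hW, hcons]
      have hrev : (temp :: W rest).reverse = (W rest).reverse ++ [temp] := by simp
      rw [hrev, join_snoc [' '] temp ((W rest).reverse) (by simpa using W_ne_nil rest)]
      rw [List.reverse_append, List.flatten_append]
      rw [ih []]
      rw [consHead_nil _ (W_ne_nil rest)]
      by_cases ht : temp = []
      · subst ht; simp
      · rw [if_pos (by simpa using ht)]
        simp
    · simp only [aLoop, if_pos (by simpa using hl : l ≠ ' ')]
      rw [ih (temp ++ [l])]
      have : W (l :: rest) = consHead [l] (W rest) := by
        simp only [W, if_neg hl]
        cases h : W rest <;> simp [consHead]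
      rw [this, consHead_consHead]

-- ===== VERDICT (by name: the statement is the Claim_ definition above) =====
theorem string_transformer_spec : Claim_equal_string_transformer := by
  intro s _
  unfold Spec_string_transformer string_transformer string_transformer_alt
  rw [splitOn_eq_W, main_lemma ((s.toList).map swChar) [], consHead_nil _ (W_ne_nil _)]
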